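-- pv_equiv track=rewrite | github.com/wally-wally/TIL | 02_algorithm/programmers/Level3/타일 장식물.py | solution
-- ===== SOURCE A (Python) =====
-- def solution(N):
--     DP = [0] * (N + 1)
--     DP[1] = DP[2] = 1
--     if N == 1:
--         return 4
--     elif N == 2:
--         return 6
--     for i in range(3, N + 1):
--         DP[i] = DP[i - 1] + DP[i - 2]
--     return DP[N] * 2 + (DP[N] + DP[N - 1]) * 2
-- ===== SOURCE B (Python) =====
-- def solution(N):
--     # Fast-doubling Fibonacci: perimeter = 2 * F(N + 2), computed in O(log N).
--     def fd(n):
--         # returns (F(n), F(n + 1))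
--         if n == 0:
--             return (0, 1)
--         a, b = fd(n >> 1)
--         c = a * (2 * b - a)
--         d = a * a + b * b
--         if n & 1:
--             return (d, c + d)
--         return (c, d)
--     return 2 * fd(N + 2)[0]
-- ===== Notes on version B (the rewrite author's own statement) =====
-- stated objective: faster
-- what changed: Replaces the O(N) DP array of Fibonacci numbers with recursive fast-doubling Fibonacci, returning 2*F(N+2) directly in O(log N) arithmetic steps.
import Mathlib
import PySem

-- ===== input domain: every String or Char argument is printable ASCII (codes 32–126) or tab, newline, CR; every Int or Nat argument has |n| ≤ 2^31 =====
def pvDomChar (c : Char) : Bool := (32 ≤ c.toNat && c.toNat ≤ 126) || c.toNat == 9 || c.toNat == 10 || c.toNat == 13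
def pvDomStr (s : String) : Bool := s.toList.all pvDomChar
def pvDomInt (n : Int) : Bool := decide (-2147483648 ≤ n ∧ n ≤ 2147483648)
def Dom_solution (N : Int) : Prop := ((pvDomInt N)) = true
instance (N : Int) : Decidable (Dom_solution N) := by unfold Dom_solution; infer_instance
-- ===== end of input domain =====

-- B replaces A's O(N) DP array with fast-doubling Fibonacci (2*F(N+2)), O(log N) steps.

-- ===== PORT A =====
def solution (N : Int) : Int :=
  let DP := List.replicate (N + 1).toNat (0 : Int)
  let DP := PySem.List.pySetD DP 1 1
  let DP := PySem.List.pySetD DP 2 1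
  if N = 1 then 4
  else if N = 2 then 6
  else
    let DP := (PySem.List.pyRange 3 (N + 1) 1).foldl
      (fun DP i => PySem.List.pySetD DP i
        (PySem.List.pyGetD DP (i - 1) 0 + PySem.List.pyGetD DP (i - 2) 0)) DP
    PySem.List.pyGetD DP N 0 * 2 + (PySem.List.pyGetD DP N 0 + PySem.List.pyGetD DP (N - 1) 0) * 2

-- ===== PORT B =====
-- fd n = (F(n), F(n+1)) by fast doubling; n >> 1 on a nonnegative Python int is n / 2, n & 1 is n % 2.
def fd : Nat → Int × Int
  | 0 => (0, 1)
  | n + 1 =>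
    let p := fd ((n + 1) / 2)
    let a := p.1
    let b := p.2
    let c := a * (2 * b - a)
    let d := a * a + b * b
    if (n + 1) % 2 = 1 then (d, c + d) else (c, d)
decreasing_by exact Nat.div_lt_self (Nat.succ_pos n) (by norm_num)

def solution_alt (N : Int) : Int := 2 * (fd (N + 2).toNat).1

-- ===== PRECONDITION & SPEC =====
-- A raises IndexError for N ≤ 1 (the write DP[2] or DP[1] is out of range), so those inputs are excluded.
def Pre_solution (N : Int) : Prop := 2 ≤ N
instance (N : Int) : Decidable (Pre_solution N) := by unfold Pre_solution; infer_instance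
def pvWitness_solution : Int := 5

def Spec_solution (N : Int) (out : Int) : Prop := out = solution_alt N
instance (N : Int) (out : Int) : Decidable (Spec_solution N out) := by unfold Spec_solution; infer_instance

-- ===== CLAIM (what is proved, stated in full; the proofs are below) =====
def Claim_equal_solution : Prop := ∀ (N : Int), Dom_solution N → Pre_solution N → Spec_solution N (solution N)

-- ===== LEMMAS AND PROOFS =====

-- fd computes consecutive Fibonacci numbers.
theorem fd_eq (n : Nat) : fd n = ((Nat.fib n : Int), (Nat.fib (n + 1) : Int)) := by
  induction n using Nat.strong_induction_on with
  | _ n ih =>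
    match n with
    | 0 => simp [fd]
    | Nat.succ m =>
      rw [fd]
      have ihh := ih ((m + 1) / 2) (Nat.div_lt_self (Nat.succ_pos m) (by norm_num))
      rw [ihh]
      set k := (m + 1) / 2 with hk
      have hsplit : m + 1 = 2 * k + (m + 1) % 2 := by omega
      have hfib2k : (Nat.fib (2 * k) : Int) = (Nat.fib k : Int) * (2 * (Nat.fib (k + 1) : Int) - (Nat.fib k : Int)) := by
        match k with
        | 0 => simp
        | Nat.succ j =>
          have h1 : 2 * (j + 1) = j + (j + 1) + 1 := by ring
          rw [h1, Nat.fib_add]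
          have h2 : (Nat.fib (j + 2) : Int) = (Nat.fib j : Int) + (Nat.fib (j + 1) : Int) := by
            rw [Nat.fib_add_two]; push_cast; ring
          push_cast
          rw [h2]
          ring
      have hfib2k1 : (Nat.fib (2 * k + 1) : Int) = (Nat.fib k : Int) * (Nat.fib k : Int) + (Nat.fib (k + 1) : Int) * (Nat.fib (k + 1) : Int) := by
        have h1 : 2 * k + 1 = k + k + 1 := by ring
        rw [h1, Nat.fib_add]
        push_cast
        ring
      by_cases hpar : (m + 1) % 2 = 1
      · have hm : m + 1 = 2 * k + 1 := by omega
        simp only [Nat.succ_eq_add_one]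
        rw [hpar, if_pos rfl, hm]
        refine Prod.ext ?_ ?_
        · simpa using hfib2k1.symm
        · show _ = (Nat.fib (2 * k + 1 + 1) : Int)
          have : 2 * k + 1 + 1 = 2 * (k + 1) := by ring
          rw [this]
          have h2 : (Nat.fib (2 * (k + 1)) : Int) = (Nat.fib (2 * k) : Int) + (Nat.fib (2 * k + 1) : Int) := by
            have h3 : 2 * (k + 1) = 2 * k + 2 := by ring
            rw [h3, Nat.fib_add_two]; push_cast; ring
          simp only [h2, hfib2k, hfib2k1]
          try ring
      · have hpar0 : (m + 1) % 2 = 0 := by omega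
        have hm : m + 1 = 2 * k := by omega
        simp only [Nat.succ_eq_add_one]
        rw [hpar0, if_neg (by decide : ¬ (0 = 1)), hm]
        refine Prod.ext ?_ ?_
        · simpa using hfib2k.symm
        · show _ = (Nat.fib (2 * k + 1) : Int)
          simpa using hfib2k1.symm

theorem solution_alt_fib (N : Int) (hN : 0 ≤ N) : solution_alt N = 2 * (Nat.fib ((N).toNat + 2) : Int) := by
  unfold solution_alt
  have h : (N + 2).toNat = N.toNat + 2 := by omega
  rw [h, fd_eq]

-- the initial DP array of A, for N.toNat = n (n ≥ 2)
def initDP (n : Nat) : List Int := ((List.replicate (n + 1) (0 : Int)).set 1 1).set 2 1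

def stepDP (DP : List Int) (i : Int) : List Int :=
  PySem.List.pySetD DP i (PySem.List.pyGetD DP (i - 1) 0 + PySem.List.pyGetD DP (i - 2) 0)

theorem initDP_getD (n : Nat) (hn : 3 ≤ n) (k : Nat) (hk : k ≤ 2) :
    (initDP n).getD k 0 = (Nat.fib k : Int) := by
  have h0 : 0 < n := by omega
  have h2 : 2 ≤ n := by omega
  interval_cases k <;>
    simp [initDP, List.getD, h0, h2]

-- loop invariant: after running i = 3 .. j, every cell k ≤ j holds fib k
theorem loopInv (n : Nat) (hn : 3 ≤ n) :
    ∀ (j : Nat), 2 ≤ j → j ≤ n →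
      ((PySem.List.pyRange 3 ((j : Int) + 1) 1).foldl stepDP (initDP n)).length = n + 1 ∧
      ∀ k : Nat, k ≤ j →
        ((PySem.List.pyRange 3 ((j : Int) + 1) 1).foldl stepDP (initDP n)).getD k 0 = (Nat.fib k : Int) := by
  intro j
  induction j with
  | zero => omega
  | succ j ihj =>
    intro h2 hjn
    by_cases hj2 : j + 1 = 2
    · -- base case j+1 = 2: empty range
      have hr : PySem.List.pyRange 3 (((j + 1 : Nat) : Int) + 1) 1 = [] := by
        apply PySem.List.pyRange_one_eq_nil; push_cast; omega
      rw [hr]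
      constructor
      · simp [List.foldl, initDP]
      · intro k hk
        simp only [List.foldl]
        exact initDP_getD n (by omega) k (by omega)
    · -- j + 1 ≥ 3
      have hj3 : 3 ≤ j + 1 := by omega
      obtain ⟨hlen, hvals⟩ := ihj (by omega) (by omega)
      have hsplit : PySem.List.pyRange 3 (((j + 1 : Nat) : Int) + 1) 1 =
          PySem.List.pyRange 3 ((j : Int) + 1) 1 ++ [((j : Int) + 1)] := by
        have : ((j + 1 : Nat) : Int) + 1 = ((j : Int) + 1) + 1 := by push_cast; ring
        rw [this]
        exact PySem.List.pyRange_one_succ_right (by omega)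
      rw [hsplit, List.foldl_append]
      set DP := (PySem.List.pyRange 3 ((j : Int) + 1) 1).foldl stepDP (initDP n) with hDP
      -- evaluate one step at i = j + 1
      have hstep : stepDP DP ((j : Int) + 1) =
          DP.set (j + 1) (DP.getD j 0 + DP.getD (j - 1) 0) := by
        unfold stepDP
        have e1 : (j : Int) + 1 - 1 = ((j : Nat) : Int) := by ring
        have e2 : (j : Int) + 1 - 2 = ((j - 1 : Nat) : Int) := by omega
        have e3 : (j : Int) + 1 = ((j + 1 : Nat) : Int) := by push_cast; ring
        rw [e1, e2, e3, PySem.List.pySetD_natCast, PySem.List.pyGetD_natCast, PySem.List.pyGetD_natCast]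
      rw [List.foldl_cons, List.foldl_nil, hstep]
      have hlen' : (DP.set (j + 1) (DP.getD j 0 + DP.getD (j - 1) 0)).length = n + 1 := by
        simp [hlen]
      refine ⟨hlen', ?_⟩
      intro k hk
      by_cases hkj : k = j + 1
      · subst hkj
        have hlt : j + 1 < DP.length := by omega
        have : (DP.set (j + 1) (DP.getD j 0 + DP.getD (j - 1) 0)).getD (j + 1) 0
            = DP.getD j 0 + DP.getD (j - 1) 0 := by
          simp [List.getD, List.getElem?_set_self hlt]
        rw [this, hvals j (by omega), hvals (j - 1) (by omega)]
        have : j - 1 + 2 = j + 1 := by omega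
        rw [show j + 1 = (j - 1) + 2 by omega, Nat.fib_add_two]
        push_cast
        rw [show j - 1 + 1 = j from by omega]
        ring
      · have : (DP.set (j + 1) (DP.getD j 0 + DP.getD (j - 1) 0)).getD k 0 = DP.getD k 0 := by
          simp [List.getD, List.getElem?_set_ne (by omega : j + 1 ≠ k)]
        rw [this]
        exact hvals k (by omega)

-- ===== VERDICT (by name: the statement is the Claim_ definition above) =====
theorem solution_spec : Claim_equal_solution := by
  intro N _ hpre
  unfold Spec_solution
  unfold Pre_solution at hpre
  by_cases h2 : N = 2
  · subst h2
    have hb : solution 2 = 6 := by simp [solution]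
    rw [hb, solution_alt_fib 2 (by norm_num)]
    rw [show (2 : Int).toNat + 2 = 4 from by decide]
    decide
  · have h3 : 3 ≤ N := by omega
    set n := N.toNat with hn
    have hN : N = (n : Int) := by omega
    have hn3 : 3 ≤ n := by omega
    unfold solution
    rw [if_neg (by omega), if_neg h2]
    have hNsucc : (N + 1).toNat = n + 1 := by omega
    have hinit : PySem.List.pySetD (PySem.List.pySetD (List.replicate (N + 1).toNat (0 : Int)) 1 1) 2 1 = initDP n := by
      rw [hNsucc]
      unfold initDP
      rw [show (1 : Int) = ((1 : Nat) : Int) from rfl, PySem.List.pySetD_natCast]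
      rw [show (2 : Int) = ((2 : Nat) : Int) from rfl, PySem.List.pySetD_natCast]
    simp only [hinit]
    obtain ⟨hlen, hvals⟩ := loopInv n hn3 n (by omega) (le_refl n)
    set DP := (PySem.List.pyRange 3 ((n : Int) + 1) 1).foldl stepDP (initDP n) with hDP
    have hfold : (PySem.List.pyRange 3 (N + 1) 1).foldl
        (fun DP i => PySem.List.pySetD DP i
          (PySem.List.pyGetD DP (i - 1) 0 + PySem.List.pyGetD DP (i - 2) 0)) (initDP n) = DP := by
      rw [hN]; rfl
    rw [hfold]
    have e1 : PySem.List.pyGetD DP N 0 = (Nat.fib n : Int) := by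
      rw [hN, PySem.List.pyGetD_natCast]; exact hvals n (le_refl n)
    have e2 : PySem.List.pyGetD DP (N - 1) 0 = (Nat.fib (n - 1) : Int) := by
      have : N - 1 = ((n - 1 : Nat) : Int) := by omega
      rw [this, PySem.List.pyGetD_natCast]; exact hvals (n - 1) (by omega)
    rw [e1, e2, solution_alt_fib N (by omega), ← hn]
    have hfib : (Nat.fib (n + 2) : Int) = 2 * (Nat.fib n : Int) + (Nat.fib (n - 1) : Int) := by
      rw [Nat.fib_add_two, show n + 1 = (n - 1) + 2 from by omega, Nat.fib_add_two]
      push_cast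
      rw [show n - 1 + 1 = n from by omega]
      ring
    rw [hfib]
    ring
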